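-- pv_equiv track=rewrite | github.com/mfaria724/CI2691-lab-algoritmos-1 | Laboratorio 06/Laboratorio/Soluciones/Lab06Ejercicio2.py | llenarconFib
-- ===== SOURCE A (Python) =====
-- def fib(n) -> int:
-- # PARAMETROS n: int                 // tamanio del arreglo
--
--    # Precondicion:
--    assert(n >= 0)
--
--    # VARIABLES
--    #  fk: int   // fib(k)
--    #  fk_1: int // fib(k-1)
--    #  k: int    // variable de control del ciclo
--
--    if n == 0 :
--       fk = 0
--    elif n == 1 :
--       fk = 1
--    else:
--       fk,fk_1 = 1,0
--
--       #inv: 1<=k<=N and fk contiene el fibonacci de k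
--       #cota = n-i
--       for k in range(1,n):
--         fk,fk_1 = fk + fk_1,fk
--         k = k+1
--
--    # Post:  fib devuelve el numero de fibonacci de n
--
--    return fk
--
-- def llenarconFib(N,A) -> [int]:
-- # PARAMETROS N: int                 // tamanio del arreglo
-- #            A: array [0..N) of int // arreglo con valores
--
--    # Precondicion:
--    assert(N >= 0)
--
--    # VARIABLE
--    #  k: int                 // variable de control del ciclo
--    #  F: array [0..N) of int // arreglo para el resultado
--
--    F = [ 0 for i in range(0,N)]
--
--    # cota: N-k
--    for k in range (0,N):
--      # invariante:
--      assert(0<=k<=N and all((F[i] == fib(A[i])) for i in range(0,k)))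
--
--      F[k] = fib(A[k])
--
--    # Postcondicion:
--    assert (all((F[i] == fib(A[i])) for i in range(0,N)) )
--    return F
-- ===== SOURCE B (Python) =====
-- def _fibpair(n):
--     # returns (fib(n), fib(n+1)) by fast doubling
--     if n == 0:
--         return (0, 1)
--     a, b = _fibpair(n >> 1)
--     c = a * (2 * b - a)
--     d = a * a + b * b
--     if n & 1:
--         return (d, c + d)
--     return (c, d)
--
-- def llenarconFib(N, A):
--     assert N >= 0
--     out = []
--     for x in A[:N]:
--         assert x >= 0
--         out.append(_fibpair(x)[0])
--     return out
-- ===== Notes on version B (the rewrite author's own statement) =====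
-- stated objective: faster
-- what changed: Intended as faster (measured 319x at the largest size both programs finished; on elements near 2^31 both time out since fib(n) has ~n bits): replaces the linear iterative Fibonacci inside the fill loop (plus A's quadratic re-checking invariant assertions) with a fast-doubling recursive fib computing (fib n, fib n+1) in O(log n) steps, and maps it directly over A[:N] instead of mutating a preallocated zero array by index.
import Mathlib
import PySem

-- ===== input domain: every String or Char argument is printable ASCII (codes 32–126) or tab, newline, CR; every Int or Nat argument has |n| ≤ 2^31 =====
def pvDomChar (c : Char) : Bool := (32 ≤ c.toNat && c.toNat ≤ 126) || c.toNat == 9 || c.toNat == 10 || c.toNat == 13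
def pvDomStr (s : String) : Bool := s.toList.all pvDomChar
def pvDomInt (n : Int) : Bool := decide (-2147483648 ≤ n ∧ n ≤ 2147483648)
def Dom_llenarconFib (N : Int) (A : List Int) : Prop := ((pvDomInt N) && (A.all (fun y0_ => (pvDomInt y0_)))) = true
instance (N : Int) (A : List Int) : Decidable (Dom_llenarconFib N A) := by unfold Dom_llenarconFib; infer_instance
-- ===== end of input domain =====

-- B replaces A's linear iterative fib (and quadratic invariant assertions) with
-- fast-doubling fib mapped over A[:N] (intended as faster; measured 319x at the
-- largest size both finished); proved equal wherever A returns.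

-- ===== PORT A =====
-- iterative fib: fk,fk_1 = 1,0; for k in range(1,n): fk,fk_1 = fk+fk_1,fk
def fibIter (n : Int) : Int :=
  if n = 0 then 0
  else if n = 1 then 1
  else ((PySem.List.pyRange 1 n 1).foldl
          (fun (p : Int × Int) _ => (p.1 + p.2, p.1)) (1, 0)).1

-- F = [0]*N; for k in range(0,N): F[k] = fib(A[k])  (in-range under Pre_, pyGetD is exact there)
def llenarconFib (N : Int) (A : List Int) : List Int :=
  let F := (PySem.List.pyRange 0 N 1).map (fun _ => (0 : Int))
  (PySem.List.pyRange 0 N 1).foldl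
    (fun F k => F.set k.toNat (fibIter (PySem.List.pyGetD A k 0))) F

-- ===== PORT B =====
-- fast doubling: returns (fib n, fib (n+1))
def fibPair (n : Nat) : Int × Int :=
  if h : n = 0 then (0, 1)
  else
    let p := fibPair (n / 2)
    let a := p.1
    let b := p.2
    let c := a * (2 * b - a)
    let d := a * a + b * b
    if n % 2 = 1 then (d, c + d) else (c, d)
decreasing_by exact Nat.div_lt_self (Nat.pos_of_ne_zero h) (by omega)

def llenarconFib_alt (N : Int) (A : List Int) : List Int :=
  (PySem.List.slice A none (some N)).map (fun x => (fibPair x.toNat).1)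

-- ===== PRECONDITION & SPEC =====
-- Pre_ excludes exactly where A raises: N < 0 (assert), N > len(A) (IndexError on A[k]),
-- and a negative element among the first N (assert in fib).
def Pre_llenarconFib (N : Int) (A : List Int) : Prop :=
  0 ≤ N ∧ N ≤ A.length ∧ ∀ x ∈ A.take N.toNat, 0 ≤ x
instance (N : Int) (A : List Int) : Decidable (Pre_llenarconFib N A) := by
  unfold Pre_llenarconFib; infer_instance

def pvWitness_llenarconFib : Int × List Int := (3, [0, 5, 10])

def Spec_llenarconFib (N : Int) (A : List Int) (out : List Int) : Prop := out = llenarconFib_alt N A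
instance (N : Int) (A : List Int) (out : List Int) : Decidable (Spec_llenarconFib N A out) := by unfold Spec_llenarconFib; infer_instance

-- ===== CLAIM (what is proved, stated in full; the proofs are below) =====
def Claim_equal_llenarconFib : Prop := ∀ (N : Int) (A : List Int), Dom_llenarconFib N A → Pre_llenarconFib N A → Spec_llenarconFib N A (llenarconFib N A)
-- ===== LEMMAS AND PROOFS =====

-- B's fast-doubling pair computes (fib n, fib (n+1))
lemma fibPair_eq (n : Nat) : fibPair n = ((Nat.fib n : Int), (Nat.fib (n+1) : Int)) := by
  induction n using Nat.strong_induction_on with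
  | _ n ih =>
    rw [fibPair]
    by_cases h : n = 0
    · subst h; simp
    · rw [dif_neg h]
      have ihm := ih (n / 2) (Nat.div_lt_self (Nat.pos_of_ne_zero h) (by omega))
      rw [ihm]
      set m := n / 2 with hm
      have hfib : Nat.fib m ≤ 2 * Nat.fib (m + 1) :=
        le_trans Nat.fib_le_fib_succ (by omega)
      have key2m : ((Nat.fib (2 * m) : Int)) =
          (Nat.fib m : Int) * (2 * (Nat.fib (m + 1) : Int) - (Nat.fib m : Int)) := by
        rw [Nat.fib_two_mul, Nat.cast_mul, Nat.cast_sub hfib]; push_cast; ring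
      have key2m1 : ((Nat.fib (2 * m + 1) : Int)) =
          (Nat.fib m : Int) * (Nat.fib m : Int) + (Nat.fib (m + 1) : Int) * (Nat.fib (m + 1) : Int) := by
        rw [Nat.fib_two_mul_add_one]; push_cast; ring
      have key2m2 : ((Nat.fib (2 * m + 2) : Int)) =
          (Nat.fib (2 * m) : Int) + (Nat.fib (2 * m + 1) : Int) := by
        have := Nat.fib_add_two (n := 2 * m); push_cast [this]; ring
      by_cases hp : n % 2 = 1
      · have hn : n = 2 * m + 1 := by omega
        rw [if_pos hp, hn]
        simp only [Prod.mk.injEq]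
        refine ⟨?_, ?_⟩
        · rw [key2m1]
        · show _ = ((Nat.fib (2 * m + 1 + 1) : Nat) : Int)
          rw [show 2 * m + 1 + 1 = 2 * m + 2 by ring, key2m2, key2m, key2m1]
      · have hn : n = 2 * m := by omega
        rw [if_neg hp, hn]
        simp only [Prod.mk.injEq]
        exact ⟨by rw [key2m], by rw [key2m1]⟩

-- A's fib loop invariant: after range(1,m) the pair is (fib m, fib (m-1))
lemma fibLoop (m : Nat) (hm : 1 ≤ m) :
    (PySem.List.pyRange 1 (m : Int) 1).foldl
      (fun (p : Int × Int) _ => (p.1 + p.2, p.1)) (1, 0)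
    = ((Nat.fib m : Int), (Nat.fib (m - 1) : Int)) := by
  induction m with
  | zero => omega
  | succ k ih =>
    by_cases hk : k = 0
    · subst hk
      rw [show ((1 : Nat) : Int) = 1 by norm_num, PySem.List.pyRange_one_eq_nil (by omega)]
      simp
    · have h1 : 1 ≤ k := Nat.pos_of_ne_zero hk
      rw [show ((k + 1 : Nat) : Int) = (k : Int) + 1 by push_cast; ring,
          PySem.List.pyRange_one_succ_right (by exact_mod_cast h1),
          List.foldl_append, ih h1]
      simp only [List.foldl_cons, List.foldl_nil]
      refine Prod.ext ?_ ?_ <;> simp only []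
      · have : Nat.fib (k + 1) = Nat.fib (k - 1) + Nat.fib k := by
          have h := Nat.fib_add_two (n := k - 1)
          have e1 : k - 1 + 2 = k + 1 := by omega
          have e2 : k - 1 + 1 = k := by omega
          rw [e1, e2] at h; omega
        rw [this]; push_cast; ring
      · simp

-- A's iterative fib computes Nat.fib
lemma fibIter_eq_fib (n : Nat) : fibIter (n : Int) = (Nat.fib n : Int) := by
  unfold fibIter
  by_cases h0 : n = 0
  · subst h0; simp
  · by_cases h1 : n = 1
    · subst h1; simp
    · rw [if_neg (by exact_mod_cast h0), if_neg (by exact_mod_cast h1),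
          fibLoop n (by omega)]

-- the fill loop writes the first m slots and leaves the rest of F0
lemma fillAux (A F0 : List Int) (m : Nat) (hmF : m ≤ F0.length) (hmA : m ≤ A.length) :
    (PySem.List.pyRange 0 (m : Int) 1).foldl
      (fun F k => F.set k.toNat (fibIter (PySem.List.pyGetD A k 0))) F0
    = (A.take m).map fibIter ++ F0.drop m := by
  induction m with
  | zero => rw [show ((0 : Nat) : Int) = 0 by norm_num,
                PySem.List.pyRange_one_eq_nil (by omega)]; simp
  | succ k ih =>
    have hkA : k < A.length := by omega
    have hkF : k < F0.length := by omega
    rw [show ((k + 1 : Nat) : Int) = (k : Int) + 1 by push_cast; ring,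
        PySem.List.pyRange_one_succ_right (by positivity),
        List.foldl_append, ih (by omega) (by omega)]
    simp only [List.foldl_cons, List.foldl_nil, Int.toNat_natCast]
    have hget : PySem.List.pyGetD A (k : Int) 0 = A[k] := by
      rw [PySem.List.pyGetD_natCast, List.getD_eq_getElem _ _ hkA]
    have hlen : ((A.take k).map fibIter).length = k := by
      simp [Nat.min_eq_left (le_of_lt hkA)]
    have hset : ∀ (xs ys : List Int) (v : Int), xs.length = k →
        (xs ++ ys).set k v = xs ++ ys.set 0 v := by
      intro xs ys v hx; subst hx
      rw [List.set_append_right _ _ (Nat.le_refl _), Nat.sub_self]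
    rw [hget, hset _ _ _ hlen,
        List.drop_eq_getElem_cons hkF, List.set_cons_zero,
        List.take_succ_eq_append_getElem hkA, List.map_append]
    simp

-- the fill loop on the zero array equals the map over the prefix
lemma fill_loop_eq (N : Int) (A : List Int) (h0 : 0 ≤ N) (hle : N ≤ A.length) :
    llenarconFib N A = (A.take N.toNat).map (fun x => fibIter x) := by
  unfold llenarconFib
  have hN : N = (N.toNat : Int) := (Int.toNat_of_nonneg h0).symm
  rw [hN]
  have hF0 : ((PySem.List.pyRange 0 (N.toNat : Int) 1).map (fun _ => (0 : Int))).length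
      = N.toNat := by
    rw [List.length_map, PySem.List.length_pyRange_one]; omega
  rw [fillAux A _ N.toNat (le_of_eq hF0.symm) (by omega),
      List.drop_eq_nil_of_le (le_of_eq hF0), List.append_nil]
  simp
  omega

-- ===== VERDICT (by name: the statement is the Claim_ definition above) =====
theorem llenarconFib_spec : Claim_equal_llenarconFib := by
  intro N A _ hpre
  obtain ⟨h0, hle, hpos⟩ := hpre
  show llenarconFib N A = llenarconFib_alt N A
  rw [fill_loop_eq N A h0 hle, llenarconFib_alt, PySem.List.slice_to A h0]
  refine List.map_congr_left (fun x hx => ?_)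
  have hx0 : 0 ≤ x := hpos x hx
  rw [show x = ((x.toNat : Nat) : Int) from (Int.toNat_of_nonneg hx0).symm,
      fibIter_eq_fib, fibPair_eq]
  simp
  congr 1
  omega
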